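-- pv_equiv track=rewrite | github.com/lokeshvelayudham/DataStructureAlgorathim-in-Python | 2.dataStructures/skilltest4Attempt3/specialWalk.py | find_special_walk
-- ===== SOURCE A (Python) =====
-- def dfs(node, graph, visited):
--     visited[node] = True
--     for neighbor in graph[node]:
--         if not visited[neighbor]:
--             dfs(neighbor, graph, visited)
--
-- def find_special_walk(graph, n):
--     visited = [False] * (n+1)
--     special_walk = [0] * (n+1)
--
--     for node in range(1, n+1):
--         if not visited[node]:
--             dfs(node, graph, visited)
--             special_walk[node] = 1
--
--     return special_walk[1:]
-- ===== SOURCE B (Python) =====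
-- def find_special_walk(graph, n):
--     visited = [False] * (n+1)
--     special_walk = [0] * (n+1)
--
--     for node in range(1, n+1):
--         if not visited[node]:
--             special_walk[node] = 1
--             stack = [node]
--             while stack:
--                 v = stack.pop()
--                 if not visited[v]:
--                     visited[v] = True
--                     for m in graph[v]:
--                         if not visited[m]:
--                             stack.append(m)
--
--     return special_walk[1:]
-- ===== Notes on version B (the rewrite author's own statement) =====
-- stated objective: alternative
-- what changed: The recursive dfs helper is replaced by an inline iterative traversal with an explicit stack (mark on pop, push unvisited neighbours), so no Python recursion is used; outer loop and output array are unchanged.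
-- outside the precondition, e.g. on find_special_walk({1: [-1]}, 1): A returns [1], B returns [1]; on find_special_walk({1: [0], 0: []}, 1): A returns [1], B returns [1]
import Mathlib
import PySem

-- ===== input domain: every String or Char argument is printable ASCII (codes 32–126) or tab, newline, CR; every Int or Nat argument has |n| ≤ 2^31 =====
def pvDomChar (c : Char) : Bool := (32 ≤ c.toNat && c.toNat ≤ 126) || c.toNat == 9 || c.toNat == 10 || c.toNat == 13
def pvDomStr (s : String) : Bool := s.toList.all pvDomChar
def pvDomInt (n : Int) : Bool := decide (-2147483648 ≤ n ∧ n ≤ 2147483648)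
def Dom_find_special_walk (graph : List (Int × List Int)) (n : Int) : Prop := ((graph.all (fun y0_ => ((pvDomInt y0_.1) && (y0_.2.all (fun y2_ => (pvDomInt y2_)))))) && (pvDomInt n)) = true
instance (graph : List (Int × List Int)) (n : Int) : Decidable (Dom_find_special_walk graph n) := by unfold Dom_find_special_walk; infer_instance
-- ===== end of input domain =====

-- B replaces the recursive dfs helper by an iterative explicit-stack traversal of each component (alternative decomposition; same outer loop and output).
-- ===== PORT A =====
-- helper for termination of the B port's while-loop: number of unvisited cells
def pvCF (v : List Bool) : Nat := v.count false

theorem pvCF_set_lt {v : List Bool} {j : Nat} (hj : j < v.length) (hv : v.getD j false = false) :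
    pvCF (v.set j true) < pvCF v := by
  induction v generalizing j with
  | nil => simp at hj
  | cons a t ih =>
    cases j with
    | zero =>
      simp only [List.getD_cons_zero] at hv
      subst hv; simp [pvCF]
    | succ j =>
      have hj' : j < t.length := by simpa using hj
      have hv' : t.getD j false = false := by simpa using hv
      have := ih hj' hv'
      simp only [List.set_cons_succ, pvCF, List.count_cons] at this ⊢
      omega

theorem pvCF_pySetD_lt {v : List Bool} {i : Int} (h : PySem.List.pyGet? v i = some false) :
    pvCF (PySem.List.pySetD v i true) < pvCF v := by
  simp only [PySem.List.pyGet?] at h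
  cases hk : PySem.List.pyIdx? v.length i with
  | none => simp [hk] at h
  | some k =>
    rw [hk] at h
    simp only [Option.bind_some] at h
    have hklen : k < v.length := by
      by_contra hc
      rw [List.getElem?_eq_none (by omega)] at h
      simp at h
    have hv : v.getD k false = false := by
      rw [List.getD_eq_getElem _ _ hklen]
      rw [List.getElem?_eq_getElem hklen] at h
      exact Option.some.inj h
    simp only [PySem.List.pySetD, PySem.List.pySet?, hk, Option.map_some, Option.getD_some]
    exact pvCF_set_lt hklen hv

mutual
def pvDfs (g : List (Int × List Int)) : Nat → Int → List Bool → List Bool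
  | 0, _, v => v   -- fuel guard (callers pass adequate fuel); Python recursion has no such case
  | f+1, node, v => pvGo g f ((g.lookup node).getD []) (PySem.List.pySetD v node true)
termination_by f _ _ => (f, 0)

def pvGo (g : List (Int × List Int)) : Nat → List Int → List Bool → List Bool
  | _, [], v => v
  | f, m :: ms, v =>
    match PySem.List.pyGet? v m with
    | none => v                 -- IndexError in Python; unreachable under Pre_
    | some true => pvGo g f ms v
    | some false => pvGo g f ms (pvDfs g f m v)
termination_by f l _ => (f, l.length + 1)
end

def find_special_walk (graph : List (Int × List Int)) (n : Int) : List Int :=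
  let st := (PySem.List.pyRange 1 (n+1) 1).foldl
    (fun st node =>
      if PySem.List.pyGetD st.1 node false = true then st
      else (pvDfs graph (pvCF st.1) node st.1, PySem.List.pySetD st.2 node 1))
    (List.replicate (n+1).toNat false, List.replicate (n+1).toNat (0 : Int))
  PySem.List.slice st.2 (some 1) none

def pvWalk (g : List (Int × List Int)) : List Int → List Bool → List Bool
  | [], v => v
  | top :: rest, v =>
    match h : PySem.List.pyGet? v top with
    | none => v                 -- IndexError in Python; unreachable under Pre_
    | some true => pvWalk g rest v
    | some false =>
      let v' := PySem.List.pySetD v top true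
      pvWalk g (((g.lookup top).getD []).foldl
        (fun st m => if PySem.List.pyGetD v' m false = true then st else m :: st) rest) v'
termination_by stack v => (pvCF v, stack.length)
decreasing_by
  all_goals simp_wf
  · exact Prod.Lex.right _ (by omega)
  · exact Prod.Lex.left _ _ (pvCF_pySetD_lt h)

def find_special_walk_alt (graph : List (Int × List Int)) (n : Int) : List Int :=
  let st := (PySem.List.pyRange 1 (n+1) 1).foldl
    (fun st node =>
      if PySem.List.pyGetD st.1 node false = true then st
      else (pvWalk graph [node] st.1, PySem.List.pySetD st.2 node 1))
    (List.replicate (n+1).toNat false, List.replicate (n+1).toNat (0 : Int))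
  PySem.List.slice st.2 (some 1) none

-- ===== PRECONDITION & SPEC =====
-- Pre_ excludes inputs on which Python A raises (a key 1..n missing from graph: KeyError;
-- a neighbour outside 1..n: IndexError/KeyError, or a silent negative-index wraparound read
-- on which A happens to return), and association lists with duplicate keys, which cannot
-- arise from a Python dict argument (lookup order would be an artefact of the encoding).
-- (the middle clause states "every key 1..n occurs among the distinct keys" by counting,
-- so that it is decidable without materializing range(1, n+1))
def Pre_find_special_walk (graph : List (Int × List Int)) (n : Int) : Prop :=
  (graph.map Prod.fst).Nodup ∧
  (n ≤ 0 ∨ ((graph.map Prod.fst).filter (fun k => decide (1 ≤ k) && decide (k ≤ n))).length = n.toNat) ∧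
  (∀ p ∈ graph, 1 ≤ p.1 → p.1 ≤ n → ∀ m ∈ p.2, 1 ≤ m ∧ m ≤ n)
instance (graph : List (Int × List Int)) (n : Int) : Decidable (Pre_find_special_walk graph n) := by
  unfold Pre_find_special_walk; infer_instance

def pvWitness_find_special_walk : (List (Int × List Int)) × Int := ([(1,[2]),(2,[1]),(3,[])], 3)

def Spec_find_special_walk (graph : List (Int × List Int)) (n : Int) (out : List Int) : Prop :=
  out = find_special_walk_alt graph n
instance (graph : List (Int × List Int)) (n : Int) (out : List Int) : Decidable (Spec_find_special_walk graph n out) := by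
  unfold Spec_find_special_walk; infer_instance

-- ===== CLAIM (what is proved, stated in full; the proofs are below) =====
def Claim_equal_find_special_walk : Prop := ∀ (graph : List (Int × List Int)) (n : Int), Dom_find_special_walk graph n → Pre_find_special_walk graph n → Spec_find_special_walk graph n (find_special_walk graph n)

-- ===== LEMMAS AND PROOFS =====

-- index bridges between the PySem primitives and List.getD / List.set on nonnegative indices
theorem pvGet?_some {v : List Bool} {x : Int} {b : Bool} (hx : 0 ≤ x)
    (h : PySem.List.pyGet? v x = some b) : x.toNat < v.length ∧ v.getD x.toNat false = b := by
  
  simp only [PySem.List.pyGet?, PySem.List.pyIdx?] at h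
  rw [if_pos hx] at h
  by_cases hlt : x < (v.length : Int)
  · rw [if_pos hlt] at h
    simp only [Option.bind_some] at h
    have hl : x.toNat < v.length := by omega
    refine ⟨hl, ?_⟩
    rw [List.getD_eq_getElem _ _ hl]
    rw [List.getElem?_eq_getElem hl] at h
    exact Option.some.inj h
  · rw [if_neg hlt] at h
    simp at h

theorem pvGet?_inrange (v : List Bool) {x : Int} (hx : 0 ≤ x) (hl : x.toNat < v.length) :
    PySem.List.pyGet? v x = some (v.getD x.toNat false) := by
  
  simp only [PySem.List.pyGet?, PySem.List.pyIdx?]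
  rw [if_pos hx, if_pos (by omega : x < (v.length : Int))]
  simp only [Option.bind_some]
  rw [List.getElem?_eq_getElem hl, List.getD_eq_getElem _ _ hl]

theorem pvGetD_bridge (v : List Bool) {x : Int} (hx : 0 ≤ x) :
    PySem.List.pyGetD v x false = v.getD x.toNat false := by
  
  simp only [PySem.List.pyGetD, PySem.List.pyGet?, PySem.List.pyIdx?]
  rw [if_pos hx]
  by_cases hlt : x < (v.length : Int)
  · rw [if_pos hlt]
    simp only [Option.bind_some]
    have hl : x.toNat < v.length := by omega
    rw [List.getElem?_eq_getElem hl, List.getD_eq_getElem _ _ hl]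
    rfl
  · rw [if_neg hlt]
    rw [List.getD_eq_default _ _ (by omega)]
    rfl

theorem pvSetD_bridge {α : Type} (v : List α) {x : Int} (a : α) (hx : 0 ≤ x) :
    PySem.List.pySetD v x a = v.set x.toNat a := by
  
  simp only [PySem.List.pySetD, PySem.List.pySet?, PySem.List.pyIdx?]
  rw [if_pos hx]
  by_cases hlt : x < (v.length : Int)
  · rw [if_pos hlt]; rfl
  · rw [if_neg hlt]
    simp only [Option.map_none, Option.getD_none]
    rw [List.set_eq_of_length_le (by omega)]

theorem pvGetD_set (v : List Bool) (j k : Nat) (a : Bool) :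
    (v.set j a).getD k false = if j = k ∧ j < v.length then a else v.getD k false := by
  
  by_cases hj : j < v.length
  · by_cases hjk : j = k
    · subst hjk
      rw [List.getD_eq_getElem _ _ (by simpa using hj), if_pos ⟨rfl, hj⟩]
      simp
    · rw [if_neg (by tauto)]
      by_cases hk : k < v.length
      · rw [List.getD_eq_getElem _ _ (by simpa using hk), List.getD_eq_getElem _ _ hk]
        simp [List.getElem_set_ne hjk]
      · rw [List.getD_eq_default _ _ (by simpa using (by omega : v.length ≤ k)),
           List.getD_eq_default _ _ (by omega)]
  · rw [List.set_eq_of_length_le (by omega), if_neg (by tauto)]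

theorem pvCF_pos {v : List Bool} {j : Nat} (hj : j < v.length) (hv : v.getD j false = false) :
    0 < pvCF v := by
  
  have hmem : false ∈ v := by
    rw [List.getD_eq_getElem _ _ hj] at hv
    rw [← hv]
    exact List.getElem_mem hj
  simpa [pvCF, List.count_pos_iff] using hmem

theorem pvCF_antitone {v w : List Bool} (hlen : w.length = v.length)
    (hmono : ∀ j : Nat, v.getD j false = true → w.getD j false = true) : pvCF w ≤ pvCF v := by
  
  induction v generalizing w with
  | nil => simp_all [List.length_eq_zero_iff, pvCF]
  | cons a t ih =>
    cases w with
    | nil => simp at hlen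
    | cons b u =>
      have h0 := hmono 0
      have hrest : ∀ j : Nat, t.getD j false = true → u.getD j false = true := by
        intro j hj
        simpa using hmono (j+1) (by simpa using hj)
      have hle := ih (w := u) (by simpa using hlen) hrest
      simp only [pvCF, List.count_cons] at hle ⊢
      simp only [List.getD_cons_zero] at h0
      cases a <;> cases b <;> simp_all
      omega

theorem pvToNat_inj {x y : Int} (hx : 1 ≤ x) (hy : 1 ≤ y) (h : x.toNat = y.toNat) : x = y := by
  omega

theorem pvLookup_mem {g : List (Int × List Int)} {u : Int} {l : List Int}
    (h : g.lookup u = some l) : (u, l) ∈ g := by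
  
  induction g with
  | nil => simp [List.lookup] at h
  | cons p t ih =>
    rw [List.lookup] at h
    by_cases he : u == p.1
    · rw [he] at h
      have h1 : p.1 = u := by
        have := eq_of_beq he
        omega
      have h2 : p.2 = l := Option.some.inj h
      have : p = (u, l) := Prod.ext h1 h2
      simp [this]
    · rw [Bool.eq_false_iff.mpr he] at h
      exact List.mem_cons_of_mem _ (ih h)

-- membership in the push-fold of the B port
theorem pvMem_push (l rest : List Int) (c : Int → Bool) (m : Int) :
    m ∈ l.foldl (fun st x => if c x = true then st else x :: st) rest ↔
      m ∈ rest ∨ (m ∈ l ∧ c m = false) := by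
  
  induction l generalizing rest with
  | nil => simp
  | cons a t ih =>
    simp only [List.foldl_cons]
    by_cases hc : c a = true
    · rw [if_pos hc]
      rw [ih]
      constructor
      · rintro (h | h)
        · exact Or.inl h
        · exact Or.inr ⟨List.mem_cons_of_mem _ h.1, h.2⟩
      · rintro (h | ⟨hm, hcm⟩)
        · exact Or.inl h
        · rcases List.mem_cons.mp hm with rfl | hm'
          · simp [hc] at hcm
          · exact Or.inr ⟨hm', hcm⟩
    · rw [if_neg hc]
      rw [ih]
      simp only [List.mem_cons]
      constructor
      · rintro ((rfl | h) | h)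
        · exact Or.inr ⟨Or.inl rfl, by simpa using hc⟩
        · exact Or.inl h
        · exact Or.inr ⟨Or.inr h.1, h.2⟩
      · rintro (h | ⟨(rfl | hm), hcm⟩)
        · exact Or.inl (Or.inr h)
        · exact Or.inl (Or.inl rfl)
        · exact Or.inr ⟨hm, hcm⟩

-- one-step unfolding equations and small pySetD facts
theorem pvDfs_zero (g : List (Int × List Int)) (node : Int) (v : List Bool) :
    pvDfs g 0 node v = v := by rw [pvDfs]

theorem pvDfs_succ (g : List (Int × List Int)) (f : Nat) (node : Int) (v : List Bool) :
    pvDfs g (f+1) node v = pvGo g f ((g.lookup node).getD []) (PySem.List.pySetD v node true) := by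
  rw [pvDfs]

theorem pvGo_nil (g : List (Int × List Int)) (f : Nat) (v : List Bool) :
    pvGo g f [] v = v := by rw [pvGo]

theorem pvGo_cons_none {g : List (Int × List Int)} {f : Nat} {m : Int} {ms : List Int}
    {v : List Bool} (hm : PySem.List.pyGet? v m = none) : pvGo g f (m :: ms) v = v := by
  rw [pvGo, hm]

theorem pvGo_cons_true {g : List (Int × List Int)} {f : Nat} {m : Int} {ms : List Int}
    {v : List Bool} (hm : PySem.List.pyGet? v m = some true) :
    pvGo g f (m :: ms) v = pvGo g f ms v := by
  rw [pvGo, hm]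

theorem pvGo_cons_false {g : List (Int × List Int)} {f : Nat} {m : Int} {ms : List Int}
    {v : List Bool} (hm : PySem.List.pyGet? v m = some false) :
    pvGo g f (m :: ms) v = pvGo g f ms (pvDfs g f m v) := by
  rw [pvGo, hm]

theorem pvWalk_nil (g : List (Int × List Int)) (v : List Bool) : pvWalk g [] v = v := by
  rw [pvWalk]

theorem pvWalk_cons_none {g : List (Int × List Int)} {top : Int} {rest : List Int}
    {v : List Bool} (hm : PySem.List.pyGet? v top = none) : pvWalk g (top :: rest) v = v := by
  rw [pvWalk, hm]

theorem pvWalk_cons_true {g : List (Int × List Int)} {top : Int} {rest : List Int}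
    {v : List Bool} (hm : PySem.List.pyGet? v top = some true) :
    pvWalk g (top :: rest) v = pvWalk g rest v := by
  rw [pvWalk, hm]

theorem pvWalk_cons_false {g : List (Int × List Int)} {top : Int} {rest : List Int}
    {v : List Bool} (hm : PySem.List.pyGet? v top = some false) :
    pvWalk g (top :: rest) v =
      pvWalk g (((g.lookup top).getD []).foldl
        (fun st m => if PySem.List.pyGetD (PySem.List.pySetD v top true) m false = true
          then st else m :: st) rest) (PySem.List.pySetD v top true) := by
  rw [pvWalk, hm]

theorem pvSetD_len {α : Type} (v : List α) (x : Int) (a : α) :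
    (PySem.List.pySetD v x a).length = v.length := by
  simp only [PySem.List.pySetD, PySem.List.pySet?]
  cases PySem.List.pyIdx? v.length x <;> simp

theorem pvSetD_cases {α : Type} (v : List α) (x : Int) (a : α) :
    PySem.List.pySetD v x a = v ∨ ∃ k : Nat, PySem.List.pySetD v x a = v.set k a := by
  simp only [PySem.List.pySetD, PySem.List.pySet?]
  cases PySem.List.pyIdx? v.length x with
  | none => simp
  | some k => exact Or.inr ⟨k, by simp⟩

theorem pvSet_mono {v : List Bool} {j k : Nat} (h : v.getD j false = true) :
    (v.set k true).getD j false = true := by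
  rw [pvGetD_set]
  split_ifs <;> simp_all

theorem pvSetD_mono {v : List Bool} {x : Int} {j : Nat} (h : v.getD j false = true) :
    (PySem.List.pySetD v x true).getD j false = true := by
  rcases pvSetD_cases v x true with hc | ⟨k, hc⟩ <;> rw [hc]
  · exact h
  · exact pvSet_mono h

-- ===== length and monotonicity of the traversals =====

theorem pvDfsGo_basic (g : List (Int × List Int)) : ∀ f : Nat,
    (∀ (node : Int) (v : List Bool), (pvDfs g f node v).length = v.length ∧
      ∀ j : Nat, v.getD j false = true → (pvDfs g f node v).getD j false = true) ∧
    (∀ (l : List Int) (v : List Bool), (pvGo g f l v).length = v.length ∧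
      ∀ j : Nat, v.getD j false = true → (pvGo g f l v).getD j false = true) := by
  have hgo : ∀ f : Nat,
      (∀ (node : Int) (v : List Bool), (pvDfs g f node v).length = v.length ∧
        ∀ j : Nat, v.getD j false = true → (pvDfs g f node v).getD j false = true) →
      (∀ (l : List Int) (v : List Bool), (pvGo g f l v).length = v.length ∧
        ∀ j : Nat, v.getD j false = true → (pvGo g f l v).getD j false = true) := by
    intro f hD l
    induction l with
    | nil => intro v; simp [pvGo_nil]
    | cons m ms ih =>
      intro v
      cases hm : PySem.List.pyGet? v m with
      | none => simp [pvGo_cons_none hm]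
      | some b =>
        cases b
        · rw [pvGo_cons_false hm]
          obtain ⟨hl1, hm1⟩ := hD m v
          obtain ⟨hl2, hm2⟩ := ih (pvDfs g f m v)
          exact ⟨by rw [hl2, hl1], fun j hj => hm2 j (hm1 j hj)⟩
        · rw [pvGo_cons_true hm]
          exact ih v
  intro f
  induction f with
  | zero =>
    have hD : ∀ (node : Int) (v : List Bool), (pvDfs g 0 node v).length = v.length ∧
        ∀ j : Nat, v.getD j false = true → (pvDfs g 0 node v).getD j false = true := by
      intro node v; simp [pvDfs_zero]
    exact ⟨hD, hgo 0 hD⟩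
  | succ f ih =>
    have hD : ∀ (node : Int) (v : List Bool), (pvDfs g (f+1) node v).length = v.length ∧
        ∀ j : Nat, v.getD j false = true → (pvDfs g (f+1) node v).getD j false = true := by
      intro node v
      rw [pvDfs_succ]
      obtain ⟨hl, hm⟩ := ih.2 ((g.lookup node).getD []) (PySem.List.pySetD v node true)
      refine ⟨by rw [hl, pvSetD_len], fun j hj => hm j (pvSetD_mono hj)⟩
    exact ⟨hD, hgo (f+1) hD⟩

theorem pvWalk_basic (g : List (Int × List Int)) : ∀ (stack : List Int) (v : List Bool),
    (pvWalk g stack v).length = v.length ∧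
      ∀ j : Nat, v.getD j false = true → (pvWalk g stack v).getD j false = true := by
  refine pvWalk.induct g (motive := fun stack v => (pvWalk g stack v).length = v.length ∧
      ∀ j : Nat, v.getD j false = true → (pvWalk g stack v).getD j false = true) ?_ ?_ ?_ ?_
  · intro v; simp [pvWalk_nil]
  · intro top rest v hm; simp [pvWalk_cons_none hm]
  · intro top rest v hm ih; rw [pvWalk_cons_true hm]; exact ih
  · intro top rest v hm vset ih
    rw [pvWalk_cons_false hm]
    obtain ⟨hl, hmo⟩ := ih
    refine ⟨?_, fun j hj => ?_⟩
    · exact hl.trans (pvSetD_len v top true)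
    · exact hmo j (pvSetD_mono hj)

-- ===== reachability =====

inductive pvReach (g : List (Int × List Int)) (v : List Bool) (root : Int) : Int → Prop
  | base : pvReach g v root root
  | step {u m : Int} : pvReach g v root u → v.getD u.toNat false = false →
      m ∈ (g.lookup u).getD [] → pvReach g v root m

theorem pvReach_range {g : List (Int × List Int)} {n : Int}
    (HG : ∀ u : Int, 1 ≤ u → u ≤ n → ∀ m ∈ (g.lookup u).getD [], 1 ≤ m ∧ m ≤ n)
    {v : List Bool} {root : Int} (h1 : 1 ≤ root) (h2 : root ≤ n) :
    ∀ x, pvReach g v root x → 1 ≤ x ∧ x ≤ n := by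
  
  intro x hx
  induction hx with
  | base => exact ⟨h1, h2⟩
  | @step u m hu hvu hm ih => exact HG _ ih.1 ih.2 _ hm

theorem pvReach_marked {g : List (Int × List Int)} {n : Int}
    (HG : ∀ u : Int, 1 ≤ u → u ≤ n → ∀ m ∈ (g.lookup u).getD [], 1 ≤ m ∧ m ≤ n)
    {v w : List Bool} {root : Int} (h1 : 1 ≤ root) (h2 : root ≤ n)
    (hroot : w.getD root.toNat false = true)
    (hclosed : ∀ u : Int, 1 ≤ u → u ≤ n → w.getD u.toNat false = true →
      v.getD u.toNat false = false → ∀ m ∈ (g.lookup u).getD [], w.getD m.toNat false = true) :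
    ∀ x, pvReach g v root x → w.getD x.toNat false = true := by
  
  intro x hx
  induction hx with
  | base => exact hroot
  | @step u m hu hvu hm ih =>
    have hr := pvReach_range HG h1 h2 u hu
    exact hclosed u hr.1 hr.2 ih hvu m hm

-- ===== upper bound: every node marked by a traversal is reachable =====

theorem pvMono_contra {v w : List Bool}
    (hmono : ∀ j : Nat, v.getD j false = true → w.getD j false = true) {j : Nat}
    (h : w.getD j false = false) : v.getD j false = false := by
  cases hv : v.getD j false
  · rfl
  · exact Bool.noConfusion ((hmono j hv).symm.trans h)

theorem pvSet_false {v : List Bool} {k j : Nat} (h : (v.set k true).getD j false = false) :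
    v.getD j false = false := by
  rw [pvGetD_set] at h
  by_cases hc : k = j ∧ k < v.length
  · rw [if_pos hc] at h
    exact Bool.noConfusion h
  · rwa [if_neg hc] at h



theorem pvDfsGo_sub (g : List (Int × List Int)) (n : Int) (S : Int → Prop)
    (hSr : ∀ x, S x → 1 ≤ x ∧ x ≤ n) : ∀ f : Nat,
    (∀ (node : Int) (v : List Bool), S node → v.getD node.toNat false = false →
      (∀ u m : Int, S u → v.getD u.toNat false = false → m ∈ (g.lookup u).getD [] → S m) →
      ∀ j : Nat, (pvDfs g f node v).getD j false = true →
        v.getD j false = true ∨ ∃ x : Int, 1 ≤ x ∧ S x ∧ x.toNat = j) ∧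
    (∀ (l : List Int) (v : List Bool), (∀ m ∈ l, S m) →
      (∀ u m : Int, S u → v.getD u.toNat false = false → m ∈ (g.lookup u).getD [] → S m) →
      ∀ j : Nat, (pvGo g f l v).getD j false = true →
        v.getD j false = true ∨ ∃ x : Int, 1 ≤ x ∧ S x ∧ x.toNat = j) := by
  have hgo : ∀ f : Nat,
      (∀ (node : Int) (v : List Bool), S node → v.getD node.toNat false = false →
        (∀ u m : Int, S u → v.getD u.toNat false = false → m ∈ (g.lookup u).getD [] → S m) →
        ∀ j : Nat, (pvDfs g f node v).getD j false = true →
          v.getD j false = true ∨ ∃ x : Int, 1 ≤ x ∧ S x ∧ x.toNat = j) →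
      (∀ (l : List Int) (v : List Bool), (∀ m ∈ l, S m) →
        (∀ u m : Int, S u → v.getD u.toNat false = false → m ∈ (g.lookup u).getD [] → S m) →
        ∀ j : Nat, (pvGo g f l v).getD j false = true →
          v.getD j false = true ∨ ∃ x : Int, 1 ≤ x ∧ S x ∧ x.toNat = j) := by
    intro f hD l
    induction l with
    | nil =>
      intro v _ _ j hj
      rw [pvGo_nil] at hj
      exact Or.inl hj
    | cons m ms ih =>
      intro v hl hcl j hj
      have hSm : S m := hl m List.mem_cons_self
      have hm0 : (0:Int) ≤ m := by have := hSr m hSm; omega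
      have hltail : ∀ x ∈ ms, S x := fun x hx => hl x (List.mem_cons_of_mem _ hx)
      cases hmv : PySem.List.pyGet? v m with
      | none =>
        rw [pvGo_cons_none hmv] at hj
        exact Or.inl hj
      | some b =>
        cases b
        · rw [pvGo_cons_false hmv] at hj
          obtain ⟨hrange, hfalse⟩ := pvGet?_some hm0 hmv
          have hmono := ((pvDfsGo_basic g f).1 m v).2
          have hcl1 : ∀ u m' : Int, S u → (pvDfs g f m v).getD u.toNat false = false →
              m' ∈ (g.lookup u).getD [] → S m' :=
            fun u m' hu hv1 hm' => hcl u m' hu (pvMono_contra hmono hv1) hm'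
          rcases ih (pvDfs g f m v) hltail hcl1 j hj with h1 | h1
          · exact hD m v hSm hfalse hcl j h1
          · exact Or.inr h1
        · rw [pvGo_cons_true hmv] at hj
          exact ih v hltail hcl j hj
  intro f
  induction f with
  | zero =>
    have hD : ∀ (node : Int) (v : List Bool), S node → v.getD node.toNat false = false →
        (∀ u m : Int, S u → v.getD u.toNat false = false → m ∈ (g.lookup u).getD [] → S m) →
        ∀ j : Nat, (pvDfs g 0 node v).getD j false = true →
          v.getD j false = true ∨ ∃ x : Int, 1 ≤ x ∧ S x ∧ x.toNat = j := by
      intro node v _ _ _ j hj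
      rw [pvDfs_zero] at hj
      exact Or.inl hj
    exact ⟨hD, hgo 0 hD⟩
  | succ f ih =>
    have hD : ∀ (node : Int) (v : List Bool), S node → v.getD node.toNat false = false →
        (∀ u m : Int, S u → v.getD u.toNat false = false → m ∈ (g.lookup u).getD [] → S m) →
        ∀ j : Nat, (pvDfs g (f+1) node v).getD j false = true →
          v.getD j false = true ∨ ∃ x : Int, 1 ≤ x ∧ S x ∧ x.toNat = j := by
      intro node v hS hun hcl j hj
      have hn1 : 1 ≤ node := (hSr node hS).1
      rw [pvDfs_succ, pvSetD_bridge v true (by omega : (0:Int) ≤ node)] at hj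
      have hlm : ∀ m ∈ (g.lookup node).getD [], S m := fun m hm => hcl node m hS hun hm
      have hcl' : ∀ u m : Int, S u → (v.set node.toNat true).getD u.toNat false = false →
          m ∈ (g.lookup u).getD [] → S m :=
        fun u m hu hv' hm => hcl u m hu (pvSet_false hv') hm
      rcases ih.2 _ (v.set node.toNat true) hlm hcl' j hj with h1 | h1
      · rw [pvGetD_set] at h1
        split_ifs at h1 with hc
        · exact Or.inr ⟨node, hn1, hS, hc.1⟩
        · exact Or.inl h1
      · exact Or.inr h1
    exact ⟨hD, hgo (f+1) hD⟩

theorem pvWalk_sub (g : List (Int × List Int)) (n : Int) (S : Int → Prop)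
    (hSr : ∀ x, S x → 1 ≤ x ∧ x ≤ n) : ∀ (stack : List Int) (v : List Bool), (∀ m ∈ stack, S m) →
    (∀ u m : Int, S u → v.getD u.toNat false = false → m ∈ (g.lookup u).getD [] → S m) →
    ∀ j : Nat, (pvWalk g stack v).getD j false = true →
      v.getD j false = true ∨ ∃ x : Int, 1 ≤ x ∧ S x ∧ x.toNat = j := by
  refine pvWalk.induct g (motive := fun stack v => (∀ m ∈ stack, S m) →
      (∀ u m : Int, S u → v.getD u.toNat false = false → m ∈ (g.lookup u).getD [] → S m) →
      ∀ j : Nat, (pvWalk g stack v).getD j false = true →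
        v.getD j false = true ∨ ∃ x : Int, 1 ≤ x ∧ S x ∧ x.toNat = j) ?_ ?_ ?_ ?_
  · intro v _ _ j hj
    rw [pvWalk_nil] at hj
    exact Or.inl hj
  · intro top rest v hm _ _ j hj
    rw [pvWalk_cons_none hm] at hj
    exact Or.inl hj
  · intro top rest v hm ih hl hcl j hj
    rw [pvWalk_cons_true hm] at hj
    exact ih (fun x hx => hl x (List.mem_cons_of_mem _ hx)) hcl j hj
  · intro top rest v hm vset ih hl hcl j hj
    simp only [vset] at ih
    rw [pvWalk_cons_false hm] at hj
    have hStop : S top := hl top List.mem_cons_self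
    have ht1 : 1 ≤ top := (hSr top hStop).1
    obtain ⟨hrange, hfalse⟩ := pvGet?_some (by omega : (0:Int) ≤ top) hm
    simp only [pvSetD_bridge v true (by omega : (0:Int) ≤ top)] at ih hj
    have hlpush : ∀ m ∈ ((g.lookup top).getD []).foldl
        (fun st m => if PySem.List.pyGetD (v.set top.toNat true) m false = true
          then st else m :: st) rest, S m := by
      intro m hmm
      rcases (pvMem_push _ _ _ _).mp hmm with h1 | h1
      · exact hl m (List.mem_cons_of_mem _ h1)
      · exact hcl top m hStop hfalse h1.1
    have hcl' : ∀ u m : Int, S u → (v.set top.toNat true).getD u.toNat false = false →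
        m ∈ (g.lookup u).getD [] → S m :=
      fun u m hu hv' hmm => hcl u m hu (pvSet_false hv') hmm
    rcases ih hlpush hcl' j hj with h1 | h1
    · rw [pvGetD_set] at h1
      split_ifs at h1 with hc
      · exact Or.inr ⟨top, ht1, hStop, hc.1⟩
      · exact Or.inl h1
    · exact Or.inr h1

-- ===== lower bound: the traversal marks its root and is neighbour-closed on new nodes =====

theorem pvDfsGo_full (g : List (Int × List Int)) (n : Int)
    (HG : ∀ u : Int, 1 ≤ u → u ≤ n → ∀ m ∈ (g.lookup u).getD [], 1 ≤ m ∧ m ≤ n) : ∀ f : Nat,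
    (∀ (node : Int) (v : List Bool), pvCF v ≤ f → v.length = (n+1).toNat →
      1 ≤ node → node ≤ n → v.getD node.toNat false = false →
      (pvDfs g f node v).getD node.toNat false = true ∧
      (∀ u : Int, 1 ≤ u → u ≤ n → (pvDfs g f node v).getD u.toNat false = true →
        v.getD u.toNat false = false → ∀ m ∈ (g.lookup u).getD [],
          (pvDfs g f node v).getD m.toNat false = true)) ∧
    (∀ (l : List Int) (v : List Bool), pvCF v ≤ f → v.length = (n+1).toNat →
      (∀ m ∈ l, 1 ≤ m ∧ m ≤ n) →
      (∀ m ∈ l, (pvGo g f l v).getD m.toNat false = true) ∧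
      (∀ v0 : List Bool,
        (∀ u : Int, 1 ≤ u → u ≤ n → v.getD u.toNat false = true → v0.getD u.toNat false = false →
          ∀ m ∈ (g.lookup u).getD [], v.getD m.toNat false = true ∨ m ∈ l) →
        ∀ u : Int, 1 ≤ u → u ≤ n → (pvGo g f l v).getD u.toNat false = true →
          v0.getD u.toNat false = false → ∀ m ∈ (g.lookup u).getD [],
            (pvGo g f l v).getD m.toNat false = true)) := by
  
  have hgo : ∀ f : Nat,
      (∀ (node : Int) (v : List Bool), pvCF v ≤ f → v.length = (n+1).toNat →
        1 ≤ node → node ≤ n → v.getD node.toNat false = false →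
        (pvDfs g f node v).getD node.toNat false = true ∧
        (∀ u : Int, 1 ≤ u → u ≤ n → (pvDfs g f node v).getD u.toNat false = true →
          v.getD u.toNat false = false → ∀ m ∈ (g.lookup u).getD [],
            (pvDfs g f node v).getD m.toNat false = true)) →
      (∀ (l : List Int) (v : List Bool), pvCF v ≤ f → v.length = (n+1).toNat →
        (∀ m ∈ l, 1 ≤ m ∧ m ≤ n) →
        (∀ m ∈ l, (pvGo g f l v).getD m.toNat false = true) ∧
        (∀ v0 : List Bool,
          (∀ u : Int, 1 ≤ u → u ≤ n → v.getD u.toNat false = true → v0.getD u.toNat false = false →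
            ∀ m ∈ (g.lookup u).getD [], v.getD m.toNat false = true ∨ m ∈ l) →
          ∀ u : Int, 1 ≤ u → u ≤ n → (pvGo g f l v).getD u.toNat false = true →
            v0.getD u.toNat false = false → ∀ m ∈ (g.lookup u).getD [],
              (pvGo g f l v).getD m.toNat false = true)) := by
    intro f hD l
    induction l with
    | nil =>
      intro v _ hlen _
      refine ⟨by simp, ?_⟩
      intro v0 hpend u hu1 hu2 hwu hvu m hm
      rw [pvGo_nil] at hwu ⊢
      rcases hpend u hu1 hu2 hwu hvu m hm with h | h
      · exact h
      · simp at h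
    | cons m ms ih =>
      intro v hcf hlen hl
      obtain ⟨hm1, hm2⟩ := hl m List.mem_cons_self
      have hltail : ∀ x ∈ ms, 1 ≤ x ∧ x ≤ n := fun x hx => hl x (List.mem_cons_of_mem _ hx)
      have hrange : m.toNat < v.length := by rw [hlen]; omega
      cases hmv : PySem.List.pyGet? v m with
      | none =>
        have := pvGet?_inrange v (by omega : (0:Int) ≤ m) hrange
        rw [hmv] at this
        simp at this
      | some b =>
        obtain ⟨-, hval⟩ := pvGet?_some (by omega : (0:Int) ≤ m) hmv
        cases b
        · -- m unvisited: dfs into it, then continue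
          rw [pvGo_cons_false hmv]
          obtain ⟨hmarkm, hclosedm⟩ := hD m v hcf hlen hm1 hm2 hval
          obtain ⟨hlen1, hmono1⟩ := (pvDfsGo_basic g f).1 m v
          have hcf1 : pvCF (pvDfs g f m v) ≤ f :=
            le_trans (pvCF_antitone hlen1 hmono1) hcf
          obtain ⟨hmk, hcl2⟩ := ih (pvDfs g f m v) hcf1 (hlen1.trans hlen) hltail
          obtain ⟨hlen2, hmono2⟩ := (pvDfsGo_basic g f).2 ms (pvDfs g f m v)
          constructor
          · intro x hx
            rcases List.mem_cons.mp hx with rfl | hx'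
            · exact hmono2 _ hmarkm
            · exact hmk x hx'
          · intro v0 hpend u hu1 hu2 hwu hvu m' hm'
            refine hcl2 v0 ?_ u hu1 hu2 hwu hvu m' hm'
            intro u' h1' h2' hw1u' hv0u' m'' hm''
            cases hvu' : v.getD u'.toNat false with
            | true =>
              rcases hpend u' h1' h2' hvu' hv0u' m'' hm'' with hv | hin
              · exact Or.inl (hmono1 _ hv)
              · rcases List.mem_cons.mp hin with rfl | hin'
                · exact Or.inl hmarkm
                · exact Or.inr hin'
            | false =>
              exact Or.inl (hclosedm u' h1' h2' hw1u' hvu' m'' hm'')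
        · -- m already visited: skip
          rw [pvGo_cons_true hmv]
          obtain ⟨hmk, hcl2⟩ := ih v hcf hlen hltail
          obtain ⟨hlen2, hmono2⟩ := (pvDfsGo_basic g f).2 ms v
          constructor
          · intro x hx
            rcases List.mem_cons.mp hx with rfl | hx'
            · exact hmono2 _ hval
            · exact hmk x hx'
          · intro v0 hpend u hu1 hu2 hwu hvu m' hm'
            refine hcl2 v0 ?_ u hu1 hu2 hwu hvu m' hm'
            intro u' h1' h2' hvu' hv0u' m'' hm''
            rcases hpend u' h1' h2' hvu' hv0u' m'' hm'' with hv | hin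
            · exact Or.inl hv
            · rcases List.mem_cons.mp hin with rfl | hin'
              · exact Or.inl hval
              · exact Or.inr hin'
  intro f
  induction f with
  | zero =>
    have hD : ∀ (node : Int) (v : List Bool), pvCF v ≤ 0 → v.length = (n+1).toNat →
        1 ≤ node → node ≤ n → v.getD node.toNat false = false →
        (pvDfs g 0 node v).getD node.toNat false = true ∧
        (∀ u : Int, 1 ≤ u → u ≤ n → (pvDfs g 0 node v).getD u.toNat false = true →
          v.getD u.toNat false = false → ∀ m ∈ (g.lookup u).getD [],
            (pvDfs g 0 node v).getD m.toNat false = true) := by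
      intro node v hcf hlen h1 h2 hun
      have hrange : node.toNat < v.length := by rw [hlen]; omega
      have := pvCF_pos hrange hun
      omega
    exact ⟨hD, hgo 0 hD⟩
  | succ f ih =>
    have hD : ∀ (node : Int) (v : List Bool), pvCF v ≤ f+1 → v.length = (n+1).toNat →
        1 ≤ node → node ≤ n → v.getD node.toNat false = false →
        (pvDfs g (f+1) node v).getD node.toNat false = true ∧
        (∀ u : Int, 1 ≤ u → u ≤ n → (pvDfs g (f+1) node v).getD u.toNat false = true →
          v.getD u.toNat false = false → ∀ m ∈ (g.lookup u).getD [],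
            (pvDfs g (f+1) node v).getD m.toNat false = true) := by
      intro node v hcf hlen h1 h2 hun
      have hrange : node.toNat < v.length := by rw [hlen]; omega
      rw [pvDfs_succ, pvSetD_bridge v true (by omega : (0:Int) ≤ node)]
      have hcf' : pvCF (v.set node.toNat true) ≤ f := by
        have := pvCF_set_lt hrange hun
        omega
      have hlen' : (v.set node.toNat true).length = (n+1).toNat := by
        rw [List.length_set]; exact hlen
      have hnbr : ∀ m ∈ (g.lookup node).getD [], 1 ≤ m ∧ m ≤ n := HG node h1 h2
      obtain ⟨hmark, hclosepart⟩ := ih.2 ((g.lookup node).getD []) (v.set node.toNat true)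
        hcf' hlen' hnbr
      have hv'node : (v.set node.toNat true).getD node.toNat false = true := by
        rw [pvGetD_set, if_pos ⟨rfl, hrange⟩]
      constructor
      · exact ((pvDfsGo_basic g f).2 _ (v.set node.toNat true)).2 _ hv'node
      · intro u hu1 hu2 hwu hvu m hm
        refine hclosepart v ?_ u hu1 hu2 hwu hvu m hm
        intro u' h1' h2' hv'u' hvu' m' hm'
        rw [pvGetD_set] at hv'u'
        split_ifs at hv'u' with hc
        · have : u' = node := pvToNat_inj h1' h1 hc.1.symm
          subst this
          exact Or.inr hm'
        · exact absurd hv'u' (by rw [hvu']; simp)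
    exact ⟨hD, hgo (f+1) hD⟩

theorem pvWalk_full (g : List (Int × List Int)) (n : Int)
    (HG : ∀ u : Int, 1 ≤ u → u ≤ n → ∀ m ∈ (g.lookup u).getD [], 1 ≤ m ∧ m ≤ n) :
    ∀ (stack : List Int) (v : List Bool), v.length = (n+1).toNat →
      (∀ m ∈ stack, 1 ≤ m ∧ m ≤ n) →
      (∀ m ∈ stack, (pvWalk g stack v).getD m.toNat false = true) ∧
      (∀ v0 : List Bool,
        (∀ u : Int, 1 ≤ u → u ≤ n → v.getD u.toNat false = true → v0.getD u.toNat false = false →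
          ∀ m ∈ (g.lookup u).getD [], v.getD m.toNat false = true ∨ m ∈ stack) →
        ∀ u : Int, 1 ≤ u → u ≤ n → (pvWalk g stack v).getD u.toNat false = true →
          v0.getD u.toNat false = false → ∀ m ∈ (g.lookup u).getD [],
            (pvWalk g stack v).getD m.toNat false = true) := by
  refine pvWalk.induct g (motive := fun stack v => v.length = (n+1).toNat →
      (∀ m ∈ stack, 1 ≤ m ∧ m ≤ n) →
      (∀ m ∈ stack, (pvWalk g stack v).getD m.toNat false = true) ∧
      (∀ v0 : List Bool,
        (∀ u : Int, 1 ≤ u → u ≤ n → v.getD u.toNat false = true → v0.getD u.toNat false = false →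
          ∀ m ∈ (g.lookup u).getD [], v.getD m.toNat false = true ∨ m ∈ stack) →
        ∀ u : Int, 1 ≤ u → u ≤ n → (pvWalk g stack v).getD u.toNat false = true →
          v0.getD u.toNat false = false → ∀ m ∈ (g.lookup u).getD [],
            (pvWalk g stack v).getD m.toNat false = true)) ?_ ?_ ?_ ?_
  · intro v _ _
    refine ⟨by simp, ?_⟩
    intro v0 hpend u hu1 hu2 hwu hvu m hm
    rw [pvWalk_nil] at hwu ⊢
    rcases hpend u hu1 hu2 hwu hvu m hm with h | h
    · exact h
    · simp at h
  · intro top rest v hm hlen hstk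
    obtain ⟨ht1, ht2⟩ := hstk top List.mem_cons_self
    have hrange : top.toNat < v.length := by rw [hlen]; omega
    have := pvGet?_inrange v (by omega : (0:Int) ≤ top) hrange
    rw [hm] at this
    simp at this
  · intro top rest v hm ih hlen hstk
    obtain ⟨ht1, ht2⟩ := hstk top List.mem_cons_self
    obtain ⟨-, hval⟩ := pvGet?_some (by omega : (0:Int) ≤ top) hm
    have hltail : ∀ x ∈ rest, 1 ≤ x ∧ x ≤ n := fun x hx => hstk x (List.mem_cons_of_mem _ hx)
    obtain ⟨hmk, hcl⟩ := ih hlen hltail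
    rw [pvWalk_cons_true hm]
    constructor
    · intro x hx
      rcases List.mem_cons.mp hx with rfl | hx'
      · exact (pvWalk_basic g rest v).2 _ hval
      · exact hmk x hx'
    · intro v0 hpend u hu1 hu2 hwu hvu m' hm'
      refine hcl v0 ?_ u hu1 hu2 hwu hvu m' hm'
      intro u' h1' h2' hvu' hv0u' m'' hm''
      rcases hpend u' h1' h2' hvu' hv0u' m'' hm'' with hv | hin
      · exact Or.inl hv
      · rcases List.mem_cons.mp hin with rfl | hin'
        · exact Or.inl hval
        · exact Or.inr hin'
  · intro top rest v hm vset ih hlen hstk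
    simp only [vset] at ih
    obtain ⟨ht1, ht2⟩ := hstk top List.mem_cons_self
    have hrange : top.toNat < v.length := by rw [hlen]; omega
    obtain ⟨-, hval⟩ := pvGet?_some (by omega : (0:Int) ≤ top) hm
    rw [pvWalk_cons_false hm]
    simp only [pvSetD_bridge v true (by omega : (0:Int) ≤ top)] at ih ⊢
    have hlen' : (v.set top.toNat true).length = (n+1).toNat := by
      rw [List.length_set]; exact hlen
    have hpushr : ∀ m ∈ ((g.lookup top).getD []).foldl
        (fun st m => if PySem.List.pyGetD (v.set top.toNat true) m false = true
          then st else m :: st) rest, 1 ≤ m ∧ m ≤ n := by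
      intro m hmm
      rcases (pvMem_push _ _ _ _).mp hmm with h1 | h1
      · exact hstk m (List.mem_cons_of_mem _ h1)
      · exact HG top ht1 ht2 m h1.1
    obtain ⟨hmk, hcl⟩ := ih hlen' hpushr
    have hvtop : (v.set top.toNat true).getD top.toNat false = true := by
      rw [pvGetD_set, if_pos ⟨rfl, hrange⟩]
    constructor
    · intro x hx
      rcases List.mem_cons.mp hx with rfl | hx'
      · exact (pvWalk_basic g _ _).2 _ hvtop
      · exact hmk x ((pvMem_push _ _ _ _).mpr (Or.inl hx'))
    · intro v0 hpend u hu1 hu2 hwu hvu m' hm'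
      refine hcl v0 ?_ u hu1 hu2 hwu hvu m' hm'
      intro u' h1' h2' hv'u' hv0u' m'' hm''
      rw [pvGetD_set] at hv'u'
      split_ifs at hv'u' with hc
      · have : u' = top := pvToNat_inj h1' ht1 hc.1.symm
        subst this
        obtain ⟨hm''1, hm''2⟩ := HG u' ht1 ht2 m'' hm''
        cases hv'm : (v.set u'.toNat true).getD m''.toNat false
        · refine Or.inr ((pvMem_push _ _ _ _).mpr (Or.inr ⟨hm'', ?_⟩))
          rw [pvGetD_bridge _ (by omega : (0:Int) ≤ m'')]
          exact hv'm
        · exact Or.inl rfl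
      · rcases hpend u' h1' h2' hv'u' hv0u' m'' hm'' with hv | hin
        · exact Or.inl (pvSet_mono hv)
        · rcases List.mem_cons.mp hin with rfl | hin'
          · exact Or.inl hvtop
          · exact Or.inr ((pvMem_push _ _ _ _).mpr (Or.inl hin'))

-- ===== the two traversals mark the same set: both equal visited ∪ reachable =====

theorem pvList_eq_of_getD {l₁ l₂ : List Bool} (hlen : l₁.length = l₂.length)
    (h : ∀ j : Nat, l₁.getD j false = l₂.getD j false) : l₁ = l₂ := by
  
  apply List.ext_getElem hlen
  intro i hi1 hi2
  have := h i
  rwa [List.getD_eq_getElem _ _ hi1, List.getD_eq_getElem _ _ hi2] at this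

theorem pvTraversal_eq (g : List (Int × List Int)) (n : Int)
    (HG : ∀ u : Int, 1 ≤ u → u ≤ n → ∀ m ∈ (g.lookup u).getD [], 1 ≤ m ∧ m ≤ n)
    (node : Int) (v : List Bool) (hlen : v.length = (n+1).toNat)
    (h1 : 1 ≤ node) (h2 : node ≤ n) (hun : v.getD node.toNat false = false) :
    pvDfs g (pvCF v) node v = pvWalk g [node] v := by
  obtain ⟨lenA, monoA⟩ := (pvDfsGo_basic g (pvCF v)).1 node v
  obtain ⟨lenB, monoB⟩ := pvWalk_basic g [node] v
  obtain ⟨hrootA, hclosedA⟩ := (pvDfsGo_full g n HG (pvCF v)).1 node v le_rfl hlen h1 h2 hun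
  obtain ⟨hmkB, hclB⟩ := pvWalk_full g n HG [node] v hlen
    (by intro m hm; rw [List.mem_singleton] at hm; subst hm; exact ⟨h1, h2⟩)
  have hrootB : (pvWalk g [node] v).getD node.toNat false = true :=
    hmkB node List.mem_cons_self
  have hclosedB : ∀ u : Int, 1 ≤ u → u ≤ n → (pvWalk g [node] v).getD u.toNat false = true →
      v.getD u.toNat false = false → ∀ m ∈ (g.lookup u).getD [],
        (pvWalk g [node] v).getD m.toNat false = true := by
    refine hclB v ?_
    intro u _ _ hvu hv0u
    rw [hvu] at hv0u
    exact Bool.noConfusion hv0u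
  have hSr := pvReach_range HG (v := v) h1 h2
  have hstep : ∀ u m : Int, pvReach g v node u → v.getD u.toNat false = false →
      m ∈ (g.lookup u).getD [] → pvReach g v node m :=
    fun u m hu hv hm => pvReach.step hu hv hm
  have subA := (pvDfsGo_sub g n (pvReach g v node) hSr (pvCF v)).1 node v
    pvReach.base hun hstep
  have subB := pvWalk_sub g n (pvReach g v node) hSr [node] v
    (by intro m hm; rw [List.mem_singleton] at hm; subst hm; exact pvReach.base) hstep
  apply pvList_eq_of_getD (lenA.trans lenB.symm)
  intro j
  have hAB : (pvDfs g (pvCF v) node v).getD j false = true ↔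
      (pvWalk g [node] v).getD j false = true := by
    constructor
    · intro hA
      rcases subA j hA with hv | ⟨x, hx1, hxr, rfl⟩
      · exact monoB j hv
      · exact pvReach_marked HG h1 h2 hrootB hclosedB x hxr
    · intro hB
      rcases subB j hB with hv | ⟨x, hx1, hxr, rfl⟩
      · exact monoA j hv
      · exact pvReach_marked HG h1 h2 hrootA hclosedA x hxr
  cases hA' : (pvDfs g (pvCF v) node v).getD j false with
  | true => exact (hAB.mp hA').symm
  | false =>
    cases hB' : (pvWalk g [node] v).getD j false with
    | true => exact absurd (hAB.mpr hB') (by rw [hA']; exact Bool.noConfusion)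
    | false => rfl

theorem pvFold_eq (g : List (Int × List Int)) (n : Int)
    (HG : ∀ u : Int, 1 ≤ u → u ≤ n → ∀ m ∈ (g.lookup u).getD [], 1 ≤ m ∧ m ≤ n) :
    ∀ (l : List Int), (∀ x ∈ l, 1 ≤ x ∧ x ≤ n) →
    ∀ (v : List Bool) (s : List Int), v.length = (n+1).toNat →
    l.foldl (fun st node =>
        if PySem.List.pyGetD st.1 node false = true then st
        else (pvDfs g (pvCF st.1) node st.1, PySem.List.pySetD st.2 node 1)) (v, s) =
    l.foldl (fun st node =>
        if PySem.List.pyGetD st.1 node false = true then st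
        else (pvWalk g [node] st.1, PySem.List.pySetD st.2 node 1)) (v, s) := by
  intro l
  induction l with
  | nil => intro _ v s _; rfl
  | cons x xs ih =>
    intro hl v s hlen
    obtain ⟨hx1, hx2⟩ := hl x List.mem_cons_self
    have hltail : ∀ y ∈ xs, 1 ≤ y ∧ y ≤ n := fun y hy => hl y (List.mem_cons_of_mem _ hy)
    simp only [List.foldl_cons]
    rw [pvGetD_bridge v (by omega : (0:Int) ≤ x)]
    by_cases hc : v.getD x.toNat false = true
    · rw [if_pos hc, if_pos hc]
      exact ih hltail v s hlen
    · rw [if_neg hc, if_neg hc]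
      have hfalse : v.getD x.toNat false = false := by
        cases h : v.getD x.toNat false
        · rfl
        · exact absurd h hc
      rw [pvTraversal_eq g n HG x v hlen hx1 hx2 hfalse]
      refine ih hltail (pvWalk g [x] v) (PySem.List.pySetD s x 1) ?_
      rw [(pvWalk_basic g [x] v).1]
      exact hlen

-- ===== VERDICT (by name: the statement is the Claim_ definition above) =====
theorem find_special_walk_spec : Claim_equal_find_special_walk := by
  intro graph n hdom hpre
  unfold Spec_find_special_walk
  obtain ⟨hnd, hkeys, hbnd⟩ := hpre
  have HG : ∀ u : Int, 1 ≤ u → u ≤ n → ∀ m ∈ (graph.lookup u).getD [], 1 ≤ m ∧ m ≤ n := by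
    intro u hu1 hu2 m hm
    cases hlk : graph.lookup u with
    | none => rw [hlk] at hm; simp at hm
    | some lst =>
      rw [hlk] at hm
      simp only [Option.getD_some] at hm
      exact hbnd (u, lst) (pvLookup_mem hlk) hu1 hu2 m hm
  unfold find_special_walk find_special_walk_alt
  rw [pvFold_eq graph n HG (PySem.List.pyRange 1 (n+1) 1) ?_ _ _ (by simp)]
  intro x hx
  rw [PySem.List.mem_pyRange_one] at hx
  exact ⟨hx.1, by omega⟩
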